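-- pv_equiv track=rewrite | github.com/Zeydel/Advent-Of-Code | AoC23/Day18/Day18.py | get_offset_coordinates
-- ===== SOURCE A (Python) =====
-- def get_offset_coordinates(coordinates, directions):
--
--     # If we find three directions in a row that go clockwise, we add, otherwise we subtract
--     addDir = 'RDLURD'
--     subtractDir = 'DRULDR'
--
--     # Swap these if we are going counterclockwise
--     if not is_clockwise(coordinates):
--         addDir, subtractDir = subtractDir, addDir
--
--     # Init offsets as zero
--     x_offset = 0
--     y_offset = 0
--
--     # Init empty list of coordinates
--     offset_coordinates = [(0,0)]
--
--     # For every coordinate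
--     for i, c in enumerate(coordinates[:-1]):
--
--         # Extract values, plus values of the next coordinates
--         x1, y1 = c
--         x2, y2 = coordinates[i+1]
--
--         # Find the path
--         path = directions[i-1] + directions[i % len(directions)] + directions[(i+1) % len(directions)]
--
--         # If we have to add, add
--         if path in addDir:
--             if x2 > x1:
--                 x_offset += 1
--             elif x2 < x1:
--                 x_offset -= 1
--             elif y2 > y1:
--                 y_offset += 1
--             else:
--                 y_offset -= 1
--         # If we have to subtract, do so
--         elif path in subtractDir:
--             if x2 > x1:
--                 x_offset -= 1
--             elif x2 < x1:
--                 x_offset += 1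
--             elif y2 > y1:
--                 y_offset -= 1
--             else:
--                 y_offset += 1
--
--         # Then add the offset coordinate
--         offset_coordinates.append((x2+x_offset, y2+y_offset))
--
--     return offset_coordinates
--
-- def is_clockwise(coordinates):
--
--     edgeSum = 0
--
--     for i, c in enumerate(coordinates[:-1]):
--
--         edgeSum += (coordinates[i+1][0] - c[0]) * (coordinates[i+1][1] + c[1])
--
--     # We this sum is positive, we are going clockwise
--     return edgeSum > 0
-- ===== SOURCE B (Python) =====
-- def _clockwise(coordinates):
--     return sum((n[0] - c[0]) * (n[1] + c[1])
--                for c, n in zip(coordinates, coordinates[1:])) > 0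
--
--
-- def get_offset_coordinates(coordinates, directions):
--     add_dir = 'RDLURD'
--     sub_dir = 'DRULDR'
--     if not _clockwise(coordinates):
--         add_dir, sub_dir = sub_dir, add_dir
--
--     n = len(coordinates)
--
--     # Pass 1: a signed unit delta per edge (same branch logic as the spec).
--     deltas = []
--     for i in range(n - 1):
--         x1, y1 = coordinates[i]
--         x2, y2 = coordinates[i + 1]
--         path = directions[i - 1] + directions[i % len(directions)] + directions[(i + 1) % len(directions)]
--         if path in add_dir:
--             s = 1
--         elif path in sub_dir:
--             s = -1
--         else:
--             s = 0
--         if x2 > x1: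
--             deltas.append((s, 0))
--         elif x2 < x1:
--             deltas.append((-s, 0))
--         elif y2 > y1:
--             deltas.append((0, s))
--         else:
--             deltas.append((0, -s))
--
--     # Pass 2: prefix sums of the deltas.
--     offs = []
--     x = y = 0
--     for dx, dy in deltas:
--         x += dx
--         y += dy
--         offs.append((x, y))
--
--     # Pass 3: shift each coordinate (after the first) by its running offset.
--     return [(0, 0)] + [(cx + ox, cy + oy)
--                        for (cx, cy), (ox, oy) in zip(coordinates[1:], offs)]
-- ===== Notes on version B (the rewrite author's own statement) =====
-- stated objective: alternative
-- what changed: A's single stateful loop (running x/y offsets mutated branch-by-branch while appending) is replaced by three separate passes: build a list of signed unit deltas per edge, take prefix sums of the deltas, then zip the cumulative offsets with coordinates[1:] and prepend (0,0); is_clockwise is re-expressed as a sum over zip(coordinates, coordinates[1:]).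
import Mathlib
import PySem

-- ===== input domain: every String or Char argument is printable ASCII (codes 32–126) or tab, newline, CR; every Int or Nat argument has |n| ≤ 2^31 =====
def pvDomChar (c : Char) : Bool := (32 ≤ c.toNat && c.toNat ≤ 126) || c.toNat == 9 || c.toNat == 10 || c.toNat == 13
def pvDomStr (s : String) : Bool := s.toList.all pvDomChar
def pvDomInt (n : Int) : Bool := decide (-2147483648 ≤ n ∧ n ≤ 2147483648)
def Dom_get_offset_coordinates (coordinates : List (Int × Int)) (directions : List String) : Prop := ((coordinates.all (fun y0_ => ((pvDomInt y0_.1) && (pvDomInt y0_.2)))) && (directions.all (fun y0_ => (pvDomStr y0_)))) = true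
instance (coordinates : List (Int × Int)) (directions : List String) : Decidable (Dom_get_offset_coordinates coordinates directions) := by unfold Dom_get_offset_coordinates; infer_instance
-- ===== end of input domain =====

-- B replaces A's single stateful loop by three passes (per-edge signed deltas, a prefix-sum
-- scan, then a zip with coordinates[1:]); same values, same cost (objective: alternative).

-- ===== PORT A =====
def is_clockwise (coordinates : List (Int × Int)) : Bool :=
  let edgeSum := (PySem.List.enumerate (PySem.List.slice coordinates none (some (-1)))).foldl
    (fun acc ic =>
      acc + ((PySem.List.pyGetD coordinates (ic.1 + 1) (0, 0)).1 - ic.2.1) *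
            ((PySem.List.pyGetD coordinates (ic.1 + 1) (0, 0)).2 + ic.2.2)) 0
  decide (edgeSum > 0)

-- the body of A's for-loop (state = (x_offset, y_offset, offset_coordinates))
def pvAStep (coordinates : List (Int × Int)) (directions : List String) (ad sd : List Char)
    (st : Int × Int × List (Int × Int)) (ic : Int × (Int × Int)) : Int × Int × List (Int × Int) :=
  let i := ic.1
  let x1 := ic.2.1
  let y1 := ic.2.2
  let c2 := PySem.List.pyGetD coordinates (i + 1) (0, 0)
  let x2 := c2.1
  let y2 := c2.2
  let n : Int := directions.length
  let path := (PySem.List.pyGetD directions (i - 1) "").toList ++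
              (PySem.List.pyGetD directions (PySem.Int.mod i n) "").toList ++
              (PySem.List.pyGetD directions (PySem.Int.mod (i + 1) n) "").toList
  let xo := st.1
  let yo := st.2.1
  let q :=
    if PySem.Chars.isIn path ad then
      if x2 > x1 then (xo + 1, yo) else if x2 < x1 then (xo - 1, yo)
      else if y2 > y1 then (xo, yo + 1) else (xo, yo - 1)
    else if PySem.Chars.isIn path sd then
      if x2 > x1 then (xo - 1, yo) else if x2 < x1 then (xo + 1, yo)
      else if y2 > y1 then (xo, yo - 1) else (xo, yo + 1)
    else (xo, yo)
  (q.1, q.2, st.2.2 ++ [(x2 + q.1, y2 + q.2)])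

def get_offset_coordinates (coordinates : List (Int × Int)) (directions : List String) : List (Int × Int) :=
  let p := if !is_clockwise coordinates then ("DRULDR".toList, "RDLURD".toList)
           else ("RDLURD".toList, "DRULDR".toList)
  ((PySem.List.enumerate (PySem.List.slice coordinates none (some (-1)))).foldl
    (pvAStep coordinates directions p.1 p.2) (0, 0, [(0, 0)])).2.2

-- ===== PORT B =====
def pv_clockwise (coordinates : List (Int × Int)) : Bool :=
  decide (0 < ((coordinates.zip (PySem.List.slice coordinates (some 1) none)).map
    (fun cn => (cn.2.1 - cn.1.1) * (cn.2.2 + cn.1.2))).sum)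

-- B pass 1: the signed unit delta of edge i
def pvBDelta (coordinates : List (Int × Int)) (directions : List String) (ad sd : List Char)
    (i : Int) : Int × Int :=
  let c1 := PySem.List.pyGetD coordinates i (0, 0)
  let c2 := PySem.List.pyGetD coordinates (i + 1) (0, 0)
  let n : Int := directions.length
  let path := (PySem.List.pyGetD directions (i - 1) "").toList ++
              (PySem.List.pyGetD directions (PySem.Int.mod i n) "").toList ++
              (PySem.List.pyGetD directions (PySem.Int.mod (i + 1) n) "").toList
  let s : Int := if PySem.Chars.isIn path ad then 1 else if PySem.Chars.isIn path sd then -1 else 0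
  if c2.1 > c1.1 then (s, 0) else if c2.1 < c1.1 then (-s, 0)
  else if c2.2 > c1.2 then ((0 : Int), s) else (0, -s)

-- B pass 2: the prefix-sum scan step (state = (running offset, offs list))
def pvBScanStep (st : (Int × Int) × List (Int × Int)) (d : Int × Int) :
    (Int × Int) × List (Int × Int) :=
  ((st.1.1 + d.1, st.1.2 + d.2), st.2 ++ [(st.1.1 + d.1, st.1.2 + d.2)])

def get_offset_coordinates_alt (coordinates : List (Int × Int)) (directions : List String) : List (Int × Int) :=
  let p := if !pv_clockwise coordinates then ("DRULDR".toList, "RDLURD".toList)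
           else ("RDLURD".toList, "DRULDR".toList)
  let deltas := (PySem.List.pyRange 0 ((coordinates.length : Int) - 1) 1).map
    (pvBDelta coordinates directions p.1 p.2)
  let offs := (deltas.foldl pvBScanStep ((0, 0), [])).2
  (0, 0) :: ((PySem.List.slice coordinates (some 1) none).zip offs).map
    (fun co => (co.1.1 + co.2.1, co.1.2 + co.2.2))

-- ===== PRECONDITION & SPEC =====
-- Pre_ excludes exactly the inputs where the Python A raises: with at least two coordinates the
-- loop runs, so 'i % len(directions)' raises ZeroDivisionError on empty directions and
-- 'directions[i-1]' raises IndexError when len(directions) < len(coordinates) - 2.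
def Pre_get_offset_coordinates (coordinates : List (Int × Int)) (directions : List String) : Prop :=
  coordinates.length ≤ 1 ∨ (directions ≠ [] ∧ coordinates.length - 2 ≤ directions.length)
instance (coordinates : List (Int × Int)) (directions : List String) : Decidable (Pre_get_offset_coordinates coordinates directions) := by unfold Pre_get_offset_coordinates; infer_instance

def pvWitness_get_offset_coordinates : (List (Int × Int)) × List String :=
  ([(0, 0), (1, 0), (1, 1), (0, 1), (0, 0)], ["R", "D", "L", "U"])

def Spec_get_offset_coordinates (coordinates : List (Int × Int)) (directions : List String) (out : List (Int × Int)) : Prop := out = get_offset_coordinates_alt coordinates directions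
instance (coordinates : List (Int × Int)) (directions : List String) (out : List (Int × Int)) : Decidable (Spec_get_offset_coordinates coordinates directions out) := by unfold Spec_get_offset_coordinates; infer_instance

-- ===== CLAIM (what is proved, stated in full; the proofs are below) =====
def Claim_equal_get_offset_coordinates : Prop := ∀ (coordinates : List (Int × Int)) (directions : List String), Dom_get_offset_coordinates coordinates directions → Pre_get_offset_coordinates coordinates directions → Spec_get_offset_coordinates coordinates directions (get_offset_coordinates coordinates directions)

-- ===== LEMMAS AND PROOFS =====

-- reference recursion: offsets and output points of the edges s, s+1, …, s+cnt-1
def pvWV (f g : Int → Int × Int) (off : Int × Int) (s : Int) : Nat → (Int × Int) × List (Int × Int)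
  | 0 => (off, [])
  | cnt + 1 =>
    let o : Int × Int := (off.1 + (f s).1, off.2 + (f s).2)
    let r := pvWV f g o (s + 1) cnt
    (r.1, ((g (s + 1)).1 + o.1, (g (s + 1)).2 + o.2) :: r.2)

theorem pv_clockwise_eq (co : List (Int × Int)) : is_clockwise co = pv_clockwise co := by
  simp only [is_clockwise, pv_clockwise, PySem.List.slice_to_neg_one, PySem.List.slice_from_one,
    PySem.List.foldl_add]
  have hzip : co.zip co.tail =
      (PySem.List.enumerate co.dropLast 0).map
        (fun ic => (ic.2, PySem.List.pyGetD co (ic.1 + 1) (0, 0))) := by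
    apply List.ext_getElem
    · simp [PySem.List.length_enumerate]
    · intro k h1 h2
      have hk : k < co.dropLast.length := by simpa [PySem.List.length_enumerate] using h2
      have hk' : k + 1 < co.length := by simp at hk ⊢; omega
      have hg : PySem.List.pyGetD co ((k : Int) + 1) (0, 0) = co[k + 1] := by
        have : (k : Int) + 1 = ((k + 1 : Nat) : Int) := by push_cast; ring
        rw [this, PySem.List.pyGetD_natCast]
        exact List.getD_eq_getElem _ _ hk'
      simp [PySem.List.getElem_enumerate, hg, List.getElem_tail, List.getElem_dropLast]
  rw [hzip, List.map_map]
  simp [Function.comp_def, zero_add]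

theorem pvAStep_delta (co : List (Int × Int)) (di : List String) (ad sd : List Char)
    (s : Nat) (h : s < co.length) (st : Int × Int × List (Int × Int)) :
    pvAStep co di ad sd st ((s : Int), co[s]) =
      (st.1 + (pvBDelta co di ad sd s).1, st.2.1 + (pvBDelta co di ad sd s).2,
       st.2.2 ++ [((PySem.List.pyGetD co ((s : Int) + 1) (0, 0)).1 + (st.1 + (pvBDelta co di ad sd s).1),
                   (PySem.List.pyGetD co ((s : Int) + 1) (0, 0)).2 + (st.2.1 + (pvBDelta co di ad sd s).2))]) := by
  have hc1 : PySem.List.pyGetD co (s : Int) (0, 0) = co[s] := by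
    rw [PySem.List.pyGetD_natCast]; exact List.getD_eq_getElem _ _ h
  simp only [pvAStep, pvBDelta, hc1]
  split_ifs <;> simp [Prod.ext_iff] <;> ring_nf

theorem pvA_fold (co : List (Int × Int)) (di : List String) (ad sd : List Char) :
    ∀ (cnt s : Nat), s + cnt = co.dropLast.length → ∀ (xo yo : Int) (acc : List (Int × Int)),
    (PySem.List.enumerate (co.dropLast.drop s) (s : Int)).foldl (pvAStep co di ad sd) (xo, yo, acc) =
      ((pvWV (pvBDelta co di ad sd) (fun i => PySem.List.pyGetD co i (0, 0)) (xo, yo) (s : Int) cnt).1.1,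
       (pvWV (pvBDelta co di ad sd) (fun i => PySem.List.pyGetD co i (0, 0)) (xo, yo) (s : Int) cnt).1.2,
       acc ++ (pvWV (pvBDelta co di ad sd) (fun i => PySem.List.pyGetD co i (0, 0)) (xo, yo) (s : Int) cnt).2) := by
  intro cnt
  induction cnt with
  | zero =>
    intro s hs xo yo acc
    have : co.dropLast.drop s = [] := List.drop_eq_nil_of_le (by omega)
    simp [this, pvWV]
  | succ c ih =>
    intro s hs xo yo acc
    have hsm : s < co.dropLast.length := by omega
    have hsc : s < co.length := by simp at hsm ⊢; omega
    have hdrop : co.dropLast.drop s = co.dropLast[s] :: co.dropLast.drop (s + 1) :=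
      List.drop_eq_getElem_cons hsm
    rw [hdrop, PySem.List.enumerate_cons, List.foldl_cons]
    rw [List.getElem_dropLast, pvAStep_delta co di ad sd s hsc]
    have hcast : (s : Int) + 1 = ((s + 1 : Nat) : Int) := by push_cast; ring
    rw [hcast, ih (s + 1) (by omega)]
    simp only [pvWV, ← hcast]
    simp [List.append_assoc]

theorem pvBScan_shift (ds : List (Int × Int)) :
    ∀ (st : Int × Int) (l : List (Int × Int)),
    (ds.foldl pvBScanStep (st, l)).2 = l ++ (ds.foldl pvBScanStep (st, [])).2 := by
  induction ds with
  | nil => intro st l; simp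
  | cons d ds ih =>
    intro st l
    simp only [List.foldl_cons, pvBScanStep]
    rw [ih, ih ((st.1 + d.1, st.2 + d.2)) ([] ++ [(st.1 + d.1, st.2 + d.2)])]
    simp

theorem pvB_zip (co : List (Int × Int)) (f : Int → Int × Int) :
    ∀ (cnt s : Nat), s + cnt = co.dropLast.length → ∀ (off : Int × Int),
    ((co.drop (s + 1)).zip
        ((((PySem.List.pyRange (s : Int) ((co.length : Int) - 1) 1).map f).foldl
          pvBScanStep (off, [])).2)).map (fun p => (p.1.1 + p.2.1, p.1.2 + p.2.2)) =
      (pvWV f (fun i => PySem.List.pyGetD co i (0, 0)) off (s : Int) cnt).2 := by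
  intro cnt
  induction cnt with
  | zero =>
    intro s hs off
    have hb : ((co.length : Int) - 1 - (s : Int)).toNat = 0 := by
      simp [List.length_dropLast] at hs; omega
    rw [PySem.List.pyRange_one, hb]
    simp [pvWV]
  | succ c ih =>
    intro s hs off
    have hsm : s < co.dropLast.length := by omega
    have hs1 : s + 1 < co.length := by simp at hsm; omega
    have hlt : (s : Int) < (co.length : Int) - 1 := by
      simp [List.length_dropLast] at hsm; omega
    rw [PySem.List.pyRange_one_cons hlt, List.map_cons, List.foldl_cons]
    have hstep : pvBScanStep (off, []) (f s) =
        ((off.1 + (f (s : Int)).1, off.2 + (f (s : Int)).2),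
         [(off.1 + (f (s : Int)).1, off.2 + (f (s : Int)).2)]) := by
      simp [pvBScanStep]
    rw [hstep]
    rw [pvBScan_shift]
    have hdrop : co.drop (s + 1) = co[s + 1] :: co.drop (s + 2) :=
      List.drop_eq_getElem_cons hs1
    rw [hdrop]
    simp only [List.singleton_append, List.zip_cons_cons, List.map_cons]
    have hcast : (s : Int) + 1 = ((s + 1 : Nat) : Int) := by push_cast; ring
    have hg : PySem.List.pyGetD co ((s : Int) + 1) (0, 0) = co[s + 1] := by
      rw [hcast, PySem.List.pyGetD_natCast]; exact List.getD_eq_getElem _ _ hs1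
    have htail := ih (s + 1) (by omega) (off.1 + (f (s : Int)).1, off.2 + (f (s : Int)).2)
    simp only [pvWV, hg]
    refine congrArg₂ _ rfl ?_
    rw [hcast]
    have h2 : s + 2 = (s + 1) + 1 := by omega
    rw [h2]
    exact htail

-- ===== VERDICT (by name: the statement is the Claim_ definition above) =====
theorem get_offset_coordinates_spec : Claim_equal_get_offset_coordinates := by
  intro co di _ _
  unfold Spec_get_offset_coordinates get_offset_coordinates get_offset_coordinates_alt
  rw [pv_clockwise_eq, PySem.List.slice_to_neg_one, PySem.List.slice_from_one]
  dsimp only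
  set p := (if !pv_clockwise co then ("DRULDR".toList, "RDLURD".toList)
            else ("RDLURD".toList, "DRULDR".toList)) with hp
  have hA := pvA_fold co di p.1 p.2 co.dropLast.length 0 (by omega) 0 0 [(0, 0)]
  have hB := pvB_zip co (pvBDelta co di p.1 p.2) co.dropLast.length 0 (by omega) (0, 0)
  simp only [Nat.cast_zero, List.drop_zero] at hA hB
  rw [hA]
  have htail : co.tail = co.drop (0 + 1) := by simp
  rw [htail, hB]
  simp
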